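-- pv_equiv track=rewrite | github.com/Jackie2049/prefix-0501 | dependency/PrefixTrain_dev/hetero_search/aceso_search_dp_hete.py | split_devices_to_pipeline
-- ===== SOURCE A (Python) =====
-- def split_devices_to_pipeline(input_list, n):
--
--     input_list_ = input_list
--     input_list = []
--     for key in input_list_.keys():
--         input_list.append(input_list_[key])
--
--
--     def partition(elements, n):
--         if n == 1:
--             yield [elements]
--             return
--         if len(elements) == n:
--             yield [[e] for e in elements]
--             return
--         first = elements[0]
--         rest = elements[1:]
--         # Case 1: first is in its own subset
--         for p in partition(rest, n-1):
--             yield [[first]] + p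
--         # Case 2: add first to a subset in each partition of rest into n subsets
--         for p in partition(rest, n):
--             for i in range(len(p)):
--                 new_p = [lst.copy() for lst in p]
--                 new_p[i].append(first)
--                 yield new_p
--
--     if n <= 0 or n > len(input_list):
--         return []
--
--     # Generate all possible partitions
--     try:
--         all_partitions = list(partition(input_list, n))
--     except:
--         return []
--
--     # Normalize each partition and deduplicate
--     seen = set()
--     unique_partitions = []
--     for p in all_partitions:
--         # Sort each subset by 'GPU' and convert to tuple of tuples
--         sorted_subsets = [tuple(sorted((tuple(d.items()) for d in sub), key=lambda x: x[0])) for sub in p]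
--         # Sort the list of subsets to eliminate order differences between subsets
--         sorted_subsets.sort(key=lambda x: (len(x), x))
--         # Convert to a tuple for hashing
--         key = tuple(sorted_subsets)
--         if key not in seen:
--             seen.add(key)
--             # Convert back to list of lists of dicts
--             unique_partitions.append([[dict(pair) for pair in sub] for sub in sorted_subsets])
--     return unique_partitions
-- ===== SOURCE B (Python) =====
-- def split_devices_to_pipeline(input_list, n):
--     input_list_ = input_list
--     input_list = [input_list_[key] for key in input_list_.keys()]
--
--     if n <= 0 or n > len(input_list):
--         return []
--
--     # Iterative DFS with an explicit stack of (elements, k, ops) frames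
--     # instead of the recursive generator; ops records, innermost first, the
--     # transformations the recursion would apply to each produced partition.
--     all_partitions = []
--     stack = [(input_list, n, ())]
--     while stack:
--         e, k, ops = stack.pop()
--         if k == 1:
--             base = [[list(e)]]
--         elif len(e) == k:
--             base = [[[x] for x in e]]
--         else:
--             first, rest = e[0], e[1:]
--             stack.append((rest, k, (('dist', first),) + ops))
--             stack.append((rest, k - 1, (('pre', first),) + ops))
--             continue
--         cur = base
--         for tag, f in ops:
--             if tag == 'pre':
--                 cur = [[[f]] + q for q in cur]
--             else:
--                 cur = [q[:i] + [q[i] + [f]] + q[i + 1:]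
--                        for q in cur for i in range(len(q))]
--         all_partitions.extend(cur)
--
--     # Same normalization as before, deduplicated through one insertion-ordered dict.
--     uniq = {}
--     for p in all_partitions:
--         sorted_subsets = [tuple(sorted((tuple(d.items()) for d in sub), key=lambda x: x[0])) for sub in p]
--         sorted_subsets.sort(key=lambda x: (len(x), x))
--         key = tuple(sorted_subsets)
--         if key not in uniq:
--             uniq[key] = [[dict(pair) for pair in sub] for sub in sorted_subsets]
--     return list(uniq.values())
-- ===== Notes on version B (the rewrite author's own statement) =====
-- stated objective: alternative
-- what changed: The recursive two-case partition generator is replaced by an iterative depth-first traversal over an explicit stack of (elements, k, ops) frames, where ops records the pending prepend/distribute transformations as data, and the set-plus-list dedup loop is replaced by a single insertion-ordered dict keyed by the canonical form; the input extraction and the normalization block are kept verbatim.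
import Mathlib
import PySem

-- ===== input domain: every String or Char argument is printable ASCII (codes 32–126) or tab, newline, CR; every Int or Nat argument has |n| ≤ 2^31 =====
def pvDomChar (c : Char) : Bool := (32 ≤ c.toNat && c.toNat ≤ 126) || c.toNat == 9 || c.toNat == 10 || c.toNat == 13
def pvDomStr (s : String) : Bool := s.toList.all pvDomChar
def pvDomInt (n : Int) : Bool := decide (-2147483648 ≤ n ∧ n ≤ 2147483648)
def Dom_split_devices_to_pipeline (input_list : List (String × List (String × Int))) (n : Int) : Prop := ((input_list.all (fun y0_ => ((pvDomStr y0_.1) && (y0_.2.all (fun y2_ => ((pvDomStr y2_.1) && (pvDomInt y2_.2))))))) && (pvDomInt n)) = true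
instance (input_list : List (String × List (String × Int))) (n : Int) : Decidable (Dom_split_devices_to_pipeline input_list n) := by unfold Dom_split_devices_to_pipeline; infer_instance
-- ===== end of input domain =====

-- B replaces A's recursive partition generator by an explicit-stack DFS and the set+list
-- dedup loop by one insertion-ordered dict (objective: alternative decomposition, same cost).

-- ===== shared helpers (B keeps A's input extraction and normalization verbatim) =====

-- `input_list = [d[k] for k in d.keys()]` where d is the Python dict the argument denotes
def pvValues (input_list : List (String × List (String × Int))) : List (List (String × Int)) :=
  (PySem.Dict.keys (PySem.Dict.ofList input_list)).foldl
    (fun acc k => acc ++ [(PySem.Dict.get? (PySem.Dict.ofList input_list) k).getD []]) []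

-- new_p = copies of p's blocks with `first` appended to block i  (i < p.length at every use)
def pvAppendAt (p : List (List (List (String × Int)))) (i : Nat) (f : List (String × Int)) :
    List (List (List (String × Int))) := p.set i (p.getD i [] ++ [f])

-- sorted_subsets: each subset's dicts as item-lists sorted by their first item (Python tuple
-- comparison = Prod.Lex; `headD` is only evaluated on nonempty item-lists under Pre_, where
-- it is exactly Python's x[0]); then the subsets sorted by (len(x), x) (lexicographic lists)
def pvCanon (p : List (List (List (String × Int)))) : List (List (List (String × Int))) :=
  PySem.List.sorted2
    (p.map (fun sub =>
      PySem.List.sorted (sub.map (fun d => PySem.Dict.items (PySem.Dict.ofList d)))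
        (fun x => toLex (x.headD ("", 0))) false))
    (fun x => (x.length : Int)) (fun x => x.map (fun items => items.map (fun pair => toLex pair))) false

-- [[dict(pair) for pair in sub] for sub in sorted_subsets]
def pvRebuild (ss : List (List (List (String × Int)))) : List (List (List (String × Int))) :=
  ss.map (fun sub => sub.map (fun pairs => PySem.Dict.items (PySem.Dict.ofList pairs)))

-- ===== PORT A =====

-- the recursive generator `partition`, forced to a list; the `[]` branch is unreachable
-- under the `n ≤ len` guard (there the Python generator would raise inside the try block)
def pvPartA (elements : List (List (String × Int))) (n : Int) :
    List (List (List (List (String × Int)))) :=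
  if n = 1 then [[elements]]
  else if (elements.length : Int) = n then [elements.map (fun e => [e])]
  else
    match elements with
    | [] => []
    | first :: rest =>
      (pvPartA rest (n - 1)).map (fun p => [first] :: p)
      ++ (pvPartA rest n).flatMap (fun p => (List.range p.length).map (fun i => pvAppendAt p i first))
termination_by elements.length
decreasing_by all_goals simp

def split_devices_to_pipeline (input_list : List (String × List (String × Int))) (n : Int) :
    List (List (List (List (String × Int)))) :=
  if n ≤ 0 ∨ ((pvValues input_list).length : Int) < n then []
  else
    ((pvPartA (pvValues input_list) n).foldl
      (fun (st : PySem.Set (List (List (List (String × Int)))) ×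
                 List (List (List (List (String × Int))))) p =>
        if pvCanon p ∈ st.1 then st
        else (PySem.Set.add st.1 (pvCanon p), st.2 ++ [pvRebuild (pvCanon p)]))
      (PySem.Set.empty, [])).2

-- ===== PORT B =====

-- a pending transformation of a produced partition, innermost first
inductive pvOp where
  | pre (f : List (String × Int))
  | dist (f : List (String × Int))
deriving Repr, DecidableEq

def pvExpand (op : pvOp) (q : List (List (List (String × Int)))) :
    List (List (List (List (String × Int)))) :=
  match op with
  | .pre f => [[f] :: q]
  | .dist f => (List.range q.length).map (fun i => pvAppendAt q i f)

-- `cur = base; for op in ops: cur = [r for q in cur for r in expand(op, q)]`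
def pvApply (ops : List pvOp) (cur : List (List (List (List (String × Int))))) :
    List (List (List (List (String × Int)))) :=
  ops.foldl (fun cur op => cur.flatMap (pvExpand op)) cur

-- the while-loop over the explicit stack (top of stack = head); the `[]` branch is
-- unreachable under the `n ≤ len` guard
def pvRun (stk : List (List (List (String × Int)) × Int × List pvOp)) :
    List (List (List (List (String × Int)))) :=
  match stk with
  | [] => []
  | (e, k, ops) :: stk =>
    if k = 1 then pvApply ops [[e]] ++ pvRun stk
    else if (e.length : Int) = k then pvApply ops [e.map (fun x => [x])] ++ pvRun stk
    else
      match e with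
      | [] => pvRun stk
      | f :: rest => pvRun ((rest, k - 1, .pre f :: ops) :: (rest, k, .dist f :: ops) :: stk)
termination_by (stk.map (fun fr => 3 ^ fr.1.length)).sum
decreasing_by
  all_goals simp [pow_succ]
  all_goals (have h := Nat.pow_pos (a := 3) (n := rest.length) (show 0 < 3 by norm_num); omega)

def split_devices_to_pipeline_alt (input_list : List (String × List (String × Int))) (n : Int) :
    List (List (List (List (String × Int)))) :=
  if n ≤ 0 ∨ ((pvValues input_list).length : Int) < n then []
  else
    PySem.Dict.values
      ((pvRun [(pvValues input_list, n, [])]).foldl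
        (fun (d : PySem.Dict (List (List (List (String × Int))))
                             (List (List (List (String × Int))))) p =>
          if PySem.Dict.contains d (pvCanon p) then d
          else PySem.Dict.insert d (pvCanon p) (pvRebuild (pvCanon p)))
        PySem.Dict.empty)

-- ===== PRECONDITION & SPEC =====
-- Pre_ excludes exactly the inputs where Python A raises: the n-guard passes but some
-- value of the dict is an empty dict, on which the normalization's `key=lambda x: x[0]`
-- raises IndexError (both A and B raise there; A returns on every input Pre_ admits).
def Pre_split_devices_to_pipeline (input_list : List (String × List (String × Int))) (n : Int) : Prop :=
  n ≤ 0 ∨ (((PySem.Dict.ofList input_list).values.length : Int) < n) ∨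
    ∀ v ∈ (PySem.Dict.ofList input_list).values, v ≠ []
instance (input_list : List (String × List (String × Int))) (n : Int) : Decidable (Pre_split_devices_to_pipeline input_list n) := by unfold Pre_split_devices_to_pipeline; infer_instance

def pvWitness_split_devices_to_pipeline : (List (String × List (String × Int))) × Int :=
  ([("a", [("g", 1)]), ("b", [("g", 2)])], 2)

def Spec_split_devices_to_pipeline (input_list : List (String × List (String × Int))) (n : Int) (out : List (List (List (List (String × Int))))) : Prop := out = split_devices_to_pipeline_alt input_list n
instance (input_list : List (String × List (String × Int))) (n : Int) (out : List (List (List (List (String × Int))))) : Decidable (Spec_split_devices_to_pipeline input_list n out) := by unfold Spec_split_devices_to_pipeline; infer_instance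

-- ===== CLAIM (what is proved, stated in full; the proofs are below) =====
def Claim_equal_split_devices_to_pipeline : Prop := ∀ (input_list : List (String × List (String × Int))) (n : Int), Dom_split_devices_to_pipeline input_list n → Pre_split_devices_to_pipeline input_list n → Spec_split_devices_to_pipeline input_list n (split_devices_to_pipeline input_list n)

-- ===== LEMMAS AND PROOFS =====

theorem pvApply_nil (ops : List pvOp) : pvApply ops [] = [] := by
  induction ops with
  | nil => rfl
  | cons op ops ih => simpa [pvApply, List.foldl_cons] using ih

theorem pvApply_append (ops : List pvOp) (xs ys : List (List (List (List (String × Int))))) :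
    pvApply ops (xs ++ ys) = pvApply ops xs ++ pvApply ops ys := by
  induction ops generalizing xs ys with
  | nil => rfl
  | cons op ops ih => simp [pvApply, List.foldl_cons, List.flatMap_append] at *; exact ih ..

theorem pvApply_cons (op : pvOp) (ops : List pvOp) (cur : List (List (List (List (String × Int))))) :
    pvApply (op :: ops) cur = pvApply ops (cur.flatMap (pvExpand op)) := rfl

theorem pvPartA_one (e : List (List (String × Int))) : pvPartA e 1 = [[e]] := by
  rw [pvPartA.eq_def]; simp

theorem pvPartA_len (e : List (List (String × Int))) (h1 : ((e.length : Int)) ≠ 1) :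
    pvPartA e (e.length : Int) = [e.map (fun x => [x])] := by
  rw [pvPartA.eq_def]; simp [h1]

theorem pvPartA_nil (k : Int) (hk : ¬k = 1) (hl : ¬((([] : List (List (String × Int))).length : Int) = k)) :
    pvPartA [] k = [] := by
  rw [pvPartA.eq_def]; simp at hl; simp [hk, hl]

theorem pvPartA_cons (f : List (String × Int)) (rest : List (List (String × Int))) (k : Int)
    (hk : ¬k = 1) (hl : ¬(((f :: rest).length : Int) = k)) :
    pvPartA (f :: rest) k =
      (pvPartA rest (k - 1)).map (fun p => [f] :: p)
      ++ (pvPartA rest k).flatMap (fun p => (List.range p.length).map (fun i => pvAppendAt p i f)) := by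
  rw [pvPartA.eq_def]; simp only [hk, if_false, hl, if_false]

theorem pvRun_eq (stk : List (List (List (String × Int)) × Int × List pvOp)) :
    pvRun stk = stk.flatMap (fun fr => pvApply fr.2.2 (pvPartA fr.1 fr.2.1)) := by
  induction stk using pvRun.induct with
  | case1 => rw [pvRun.eq_def]; rfl
  | case2 e ops stk ih =>
    rw [pvRun.eq_def]; simp [List.flatMap_cons, ih, pvPartA_one]
  | case3 e ops stk h1 ih =>
    rw [pvRun.eq_def]
    have h1' : e.length ≠ 1 := by exact_mod_cast h1
    simp [List.flatMap_cons, ih, pvPartA_len e h1, h1']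
  | case4 k ops stk hk hl ih =>
    rw [pvRun.eq_def]
    simp only [List.flatMap_cons, if_neg hk, if_neg hl, ih, pvPartA_nil k hk hl, pvApply_nil,
      List.nil_append]
  | case5 k ops stk hk f rest hl ih =>
    have hpre : List.flatMap (pvExpand (pvOp.pre f)) (pvPartA rest (k - 1))
        = List.map (fun p => [f] :: p) (pvPartA rest (k - 1)) := by
      exact List.map_eq_flatMap.symm
    have hdist : List.flatMap (pvExpand (pvOp.dist f)) (pvPartA rest k)
        = List.flatMap (fun p => (List.range p.length).map (fun i => pvAppendAt p i f))
            (pvPartA rest k) := rfl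
    rw [pvRun.eq_def]
    simp only [if_neg hk, if_neg hl, ih, List.flatMap_cons, pvPartA_cons f rest k hk hl,
      pvApply_append, pvApply_cons, List.append_assoc]
    rw [hpre, hdist]

theorem pvRun_single (e : List (List (String × Int))) (n : Int) :
    pvRun [(e, n, [])] = pvPartA e n := by
  rw [pvRun_eq]; simp [pvApply]

theorem pvDedup_eq (parts : List (List (List (List (String × Int)))))
    (seen : PySem.Set (List (List (List (String × Int)))))
    (acc : List (List (List (List (String × Int)))))
    (d : PySem.Dict (List (List (List (String × Int)))) (List (List (List (String × Int)))))
    (hk : seen = d.keys) (hv : acc = d.values) :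
    (parts.foldl
      (fun (st : PySem.Set (List (List (List (String × Int)))) ×
                 List (List (List (List (String × Int))))) p =>
        if pvCanon p ∈ st.1 then st
        else (PySem.Set.add st.1 (pvCanon p), st.2 ++ [pvRebuild (pvCanon p)]))
      (seen, acc)).2
    = PySem.Dict.values (parts.foldl
        (fun d p =>
          if PySem.Dict.contains d (pvCanon p) then d
          else PySem.Dict.insert d (pvCanon p) (pvRebuild (pvCanon p))) d) := by
  subst hk hv
  induction parts generalizing d with
  | nil => rfl
  | cons p parts ih =>
    by_cases hm : pvCanon p ∈ d.keys
    · have hc : PySem.Dict.contains d (pvCanon p) = true :=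
        (PySem.Dict.contains_iff_mem_keys d (pvCanon p)).2 hm
      simp only [List.foldl_cons, if_pos hm, hc, if_true]
      exact ih d
    · have hc : PySem.Dict.contains d (pvCanon p) = false :=
        Bool.eq_false_iff.2 (fun h => hm ((PySem.Dict.contains_iff_mem_keys d (pvCanon p)).1 h))
      have hitems := PySem.Dict.items_insert_of_not_contains d (pvRebuild (pvCanon p)) hc
      simp only [List.foldl_cons, if_neg hm, hc, Bool.false_eq_true, if_false]
      have hkeys : PySem.Set.add d.keys (pvCanon p)
          = (PySem.Dict.insert d (pvCanon p) (pvRebuild (pvCanon p))).keys := by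
        rw [PySem.Set.add_of_not_mem hm]
        simp [PySem.Dict.keys, hitems]
      have hvals : d.values ++ [pvRebuild (pvCanon p)]
          = (PySem.Dict.insert d (pvCanon p) (pvRebuild (pvCanon p))).values := by
        simp [PySem.Dict.values, hitems]
      rw [hkeys, hvals]
      exact ih _

-- ===== VERDICT (by name: the statement is the Claim_ definition above) =====
theorem split_devices_to_pipeline_spec : Claim_equal_split_devices_to_pipeline := by
  intro input_list n _ _
  unfold Spec_split_devices_to_pipeline
  unfold split_devices_to_pipeline split_devices_to_pipeline_alt
  by_cases hg : n ≤ 0 ∨ ((pvValues input_list).length : Int) < n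
  · rw [if_pos hg, if_pos hg]
  · rw [if_neg hg, if_neg hg, pvRun_single]
    exact pvDedup_eq _ _ _ _ (by rfl) (by rfl)
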